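-- pv_equiv track=rewrite | github.com/sarkarghya/NYU-NYUSH-CS | DS_210/W2/HW_sol/question1_merge.py | merge_generator
-- ===== SOURCE A (Python) =====
-- def merge_generator(I1, I2, I3):
--     """
--     takes three iterable objects and merges them alternately
--     required runtime: O(len(I1) + len(I2) + len(I3)).
--     required space complexity: O(1)
--
--     :param I1: Iterable -- the first iterable object.
--     :param I2: Iterable -- the second iterable object.
--     :param I3: Iterable -- the third iterable object.
--
--     :return: an iterator
--     """
--     for i in range(max(len(I1), len(I2), len(I3))):
--         if i < len(I1):
--             yield I1[i]
--         if i < len(I2):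
--             yield I2[i]
--         if i < len(I3):
--             yield I3[i]
-- ===== SOURCE B (Python) =====
-- def merge_generator(I1, I2, I3):
--     # Tag every element with its output rank 3*i + j (i = index in its
--     # sequence, j = which sequence), then sort by rank and emit values.
--     tagged = []
--     for j, s in enumerate((I1, I2, I3)):
--         for i, x in enumerate(s):
--             tagged.append((3 * i + j, x))
--     tagged.sort(key=lambda t: t[0])
--     for _, x in tagged:
--         yield x
-- ===== Notes on version B (the rewrite author's own statement) =====
-- stated objective: alternative
-- what changed: Replaced the round-robin index loop by a tag-and-sort algorithm: every element is decorated with its output rank 3*i+j, the tagged list is sorted by rank, and the values are emitted in sorted order.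
import Mathlib
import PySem

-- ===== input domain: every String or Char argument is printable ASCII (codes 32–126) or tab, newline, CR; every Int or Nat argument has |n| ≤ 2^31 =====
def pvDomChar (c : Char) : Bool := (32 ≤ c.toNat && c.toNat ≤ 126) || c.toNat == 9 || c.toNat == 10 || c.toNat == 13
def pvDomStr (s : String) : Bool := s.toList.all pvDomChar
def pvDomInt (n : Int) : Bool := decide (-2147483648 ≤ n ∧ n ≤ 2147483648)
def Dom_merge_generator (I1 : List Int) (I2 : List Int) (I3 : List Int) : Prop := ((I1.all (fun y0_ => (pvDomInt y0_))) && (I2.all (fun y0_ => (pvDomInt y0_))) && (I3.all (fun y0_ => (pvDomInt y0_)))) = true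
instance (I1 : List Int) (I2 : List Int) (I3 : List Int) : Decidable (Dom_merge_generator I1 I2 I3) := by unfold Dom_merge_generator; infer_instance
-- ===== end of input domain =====

-- B merges by tagging each element with its output rank 3*i+j and sorting by that rank, instead of A's round-robin index loop; alternative algorithm, return value only (both Pythons are generators).
-- ===== PORT A =====
-- loop body of A: the elements yielded at index i
def yieldAt (I1 : List Int) (I2 : List Int) (I3 : List Int) (i : Nat) : List Int :=
  (if i < I1.length then [I1.getD i 0] else []) ++
  (if i < I2.length then [I2.getD i 0] else []) ++
  (if i < I3.length then [I3.getD i 0] else [])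

def merge_generator (I1 : List Int) (I2 : List Int) (I3 : List Int) : List Int :=
  (List.range (max I1.length (max I2.length I3.length))).foldl
    (fun acc i => acc ++ yieldAt I1 I2 I3 i) []

-- ===== PORT B =====
-- inner loop of B for one sequence s with tag j: [(3*i + j, x) for i, x in enumerate(s)]
def tagPV (j : Int) (s : List Int) : List (Int × Int) :=
  (PySem.List.enumerate s).map (fun p => (3 * p.1 + j, p.2))

-- the j-loop over the literal 3-tuple (I1, I2, I3), unrolled; then sort by t[0]; then map out the values
def merge_generator_alt (I1 : List Int) (I2 : List Int) (I3 : List Int) : List Int :=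
  (PySem.List.sorted (tagPV 0 I1 ++ tagPV 1 I2 ++ tagPV 2 I3) (fun t => t.1) false).map
    (fun t => t.2)

-- ===== PRECONDITION & SPEC =====
def Spec_merge_generator (I1 : List Int) (I2 : List Int) (I3 : List Int) (out : List Int) : Prop := out = merge_generator_alt I1 I2 I3
instance (I1 : List Int) (I2 : List Int) (I3 : List Int) (out : List Int) : Decidable (Spec_merge_generator I1 I2 I3 out) := by unfold Spec_merge_generator; infer_instance

-- ===== CLAIM (what is proved, stated in full; the proofs are below) =====
def Claim_equal_merge_generator : Prop := ∀ (I1 : List Int) (I2 : List Int) (I3 : List Int), Dom_merge_generator I1 I2 I3 → Spec_merge_generator I1 I2 I3 (merge_generator I1 I2 I3)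

-- ===== LEMMAS AND PROOFS =====

-- the interleaving with explicit output ranks, offset d = current index
def mergeTag (d : Int) : List Int → List Int → List Int → List (Int × Int)
  | [], [], [] => []
  | a::t1, b::t2, c::t3 => (3*d, a) :: (3*d+1, b) :: (3*d+2, c) :: mergeTag (d+1) t1 t2 t3
  | a::t1, b::t2, [] => (3*d, a) :: (3*d+1, b) :: mergeTag (d+1) t1 t2 []
  | a::t1, [], c::t3 => (3*d, a) :: (3*d+2, c) :: mergeTag (d+1) t1 [] t3
  | [], b::t2, c::t3 => (3*d+1, b) :: (3*d+2, c) :: mergeTag (d+1) [] t2 t3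
  | a::t1, [], [] => (3*d, a) :: mergeTag (d+1) t1 [] []
  | [], b::t2, [] => (3*d+1, b) :: mergeTag (d+1) [] t2 []
  | [], [], c::t3 => (3*d+2, c) :: mergeTag (d+1) [] [] t3

def tagF (d : Int) (j : Int) (s : List Int) : List (Int × Int) :=
  (PySem.List.enumerate s d).map (fun p => (3 * p.1 + j, p.2))

theorem mergeTag_perm (d : Int) (I1 I2 I3 : List Int) :
    (mergeTag d I1 I2 I3).Perm (tagF d 0 I1 ++ tagF d 1 I2 ++ tagF d 2 I3) := by
  fun_induction mergeTag d I1 I2 I3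
  case case1 => simp [tagF]
  all_goals
    rename_i ih
    rw [List.perm_iff_count] at ih ⊢
    intro x
    have h := ih x
    simp only [tagF, PySem.List.enumerate_cons, PySem.List.enumerate_nil, List.map_cons,
      List.map_nil, List.count_append, List.count_cons, List.nil_append, List.append_nil,
      add_zero] at h ⊢
    omega

-- bounded-and-strictly-increasing invariant for mergeTag
def Qinv (k : Int) (l : List (Int × Int)) : Prop :=
  (∀ p ∈ l, k ≤ p.1) ∧ l.Pairwise (fun p q => p.1 < q.1)

theorem Qinv_cons (k m v x2 : Int) (l : List (Int × Int)) (h : Qinv k l)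
    (h1 : v < k) (h2 : m ≤ v) : Qinv m ((v, x2) :: l) := by
  obtain ⟨hb, hp⟩ := h
  refine ⟨?_, ?_⟩
  · intro p hp'
    rcases List.mem_cons.mp hp' with rfl | hp''
    · exact h2
    · exact le_trans (le_of_lt (lt_of_le_of_lt h2 h1)) (hb p hp'')
  · exact List.Pairwise.cons (fun q hq => lt_of_lt_of_le h1 (hb q hq)) hp

theorem mergeTag_bound_pairwise (d : Int) (I1 I2 I3 : List Int) :
    Qinv (3*d) (mergeTag d I1 I2 I3) := by
  fun_induction mergeTag d I1 I2 I3
  case case1 => exact ⟨by simp, by simp⟩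
  case case2 d a t1 b t2 c t3 ih =>
    refine Qinv_cons (3*d+1) _ _ _ _ ?_ (by omega) (by omega)
    refine Qinv_cons (3*d+2) _ _ _ _ ?_ (by omega) (by omega)
    exact Qinv_cons (3*(d+1)) _ _ _ _ ih (by omega) (by omega)
  case case3 d a t1 b t2 ih =>
    refine Qinv_cons (3*d+1) _ _ _ _ ?_ (by omega) (by omega)
    exact Qinv_cons (3*(d+1)) _ _ _ _ ih (by omega) (by omega)
  case case4 d a t1 c t3 ih =>
    refine Qinv_cons (3*d+2) _ _ _ _ ?_ (by omega) (by omega)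
    exact Qinv_cons (3*(d+1)) _ _ _ _ ih (by omega) (by omega)
  case case5 d b t2 c t3 ih =>
    refine Qinv_cons (3*d+2) _ _ _ _ ?_ (by omega) (by omega)
    exact Qinv_cons (3*(d+1)) _ _ _ _ ih (by omega) (by omega)
  case case6 d a t1 ih => exact Qinv_cons (3*(d+1)) _ _ _ _ ih (by omega) (by omega)
  case case7 d b t2 ih => exact Qinv_cons (3*(d+1)) _ _ _ _ ih (by omega) (by omega)
  case case8 d c t3 ih => exact Qinv_cons (3*(d+1)) _ _ _ _ ih (by omega) (by omega)

theorem max_len_tail (I1 I2 I3 : List Int) (h : I1 ≠ [] ∨ I2 ≠ [] ∨ I3 ≠ []) :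
    max I1.length (max I2.length I3.length)
      = max I1.tail.length (max I2.tail.length I3.tail.length) + 1 := by
  cases I1 <;> cases I2 <;> cases I3 <;> simp_all

theorem yieldAt_succ (I1 I2 I3 : List Int) (i : Nat) :
    yieldAt I1 I2 I3 (i+1) = yieldAt I1.tail I2.tail I3.tail i := by
  cases I1 <;> cases I2 <;> cases I3 <;> simp [yieldAt]

theorem mergeTag_snd (I1 I2 I3 : List Int) (d : Int) :
    (List.range (max I1.length (max I2.length I3.length))).flatMap (yieldAt I1 I2 I3)
      = (mergeTag d I1 I2 I3).map (fun p => p.2) := by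
  fun_induction mergeTag d I1 I2 I3
  case case1 => simp
  all_goals
    rename_i ih
    rw [max_len_tail _ _ _ (by simp), List.range_succ_eq_map, List.flatMap_cons,
        List.flatMap_map]
    simp only [yieldAt_succ, List.tail_cons, List.tail_nil]
    rw [ih]
    simp [yieldAt]

-- ===== VERDICT (by name: the statement is the Claim_ definition above) =====
theorem merge_generator_spec : Claim_equal_merge_generator := by
  intro I1 I2 I3 _
  unfold Spec_merge_generator merge_generator merge_generator_alt
  have hsort : PySem.List.sorted (tagPV 0 I1 ++ tagPV 1 I2 ++ tagPV 2 I3)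
      (fun t => t.1) false = mergeTag 0 I1 I2 I3 := by
    apply PySem.List.sorted_eq_of_perm_of_pairwise_lt
    · have := mergeTag_perm 0 I1 I2 I3
      simpa [tagF, tagPV] using this
    · exact (mergeTag_bound_pairwise 0 I1 I2 I3).2
  rw [PySem.List.foldl_append_eq_flatMap, hsort, mergeTag_snd I1 I2 I3 0]
  simp
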